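-- pv_equiv track=rewrite | github.com/AbelPelser/AdventOfCode2020 | puzzles/Day17/day17.py | get_neighbour_coords1
-- ===== SOURCE A (Python) =====
-- import itertools
--
-- GRID_SIZE = 26
--
-- def get_neighbors_steps(n_dimensions):
--     result = list(itertools.product([-1, 0, 1], repeat=n_dimensions))
--     result.remove(tuple((0 for _ in range(n_dimensions))))
--     return result
--
-- def is_in_grid(val):
--     return 0 <= val < GRID_SIZE
--
-- def get_neighbour_coords1(x, y, z):
--     result = []
--     for d_x, d_y, d_z in get_neighbors_steps(n_dimensions=3):
--         new_x, new_y, new_z = x + d_x, y + d_y, z + d_z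
--         if not (is_in_grid(new_x) and is_in_grid(new_y) and is_in_grid(new_z)):
--             continue
--         result.append((new_x, new_y, new_z))
--     return result
-- ===== SOURCE B (Python) =====
-- GRID_SIZE = 26
--
-- def get_neighbour_coords1(x, y, z):
--     # Directly enumerate the in-grid neighbor cube via clamped per-axis ranges,
--     # skipping only the center; no offset list, no bound checks.
--     result = []
--     for nx in range(max(0, x - 1), min(GRID_SIZE, x + 2)):
--         for ny in range(max(0, y - 1), min(GRID_SIZE, y + 2)):
--             for nz in range(max(0, z - 1), min(GRID_SIZE, z + 2)):
--                 if (nx, ny, nz) != (x, y, z):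
--                     result.append((nx, ny, nz))
--     return result
-- ===== Notes on version B (the rewrite author's own statement) =====
-- stated objective: simpler
-- what changed: B enumerates in-grid neighbors directly with three nested loops over clamped per-axis ranges, skipping only the center, instead of generating all 26 offset tuples via itertools.product and filtering each shifted candidate against the grid bounds.
import Mathlib
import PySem

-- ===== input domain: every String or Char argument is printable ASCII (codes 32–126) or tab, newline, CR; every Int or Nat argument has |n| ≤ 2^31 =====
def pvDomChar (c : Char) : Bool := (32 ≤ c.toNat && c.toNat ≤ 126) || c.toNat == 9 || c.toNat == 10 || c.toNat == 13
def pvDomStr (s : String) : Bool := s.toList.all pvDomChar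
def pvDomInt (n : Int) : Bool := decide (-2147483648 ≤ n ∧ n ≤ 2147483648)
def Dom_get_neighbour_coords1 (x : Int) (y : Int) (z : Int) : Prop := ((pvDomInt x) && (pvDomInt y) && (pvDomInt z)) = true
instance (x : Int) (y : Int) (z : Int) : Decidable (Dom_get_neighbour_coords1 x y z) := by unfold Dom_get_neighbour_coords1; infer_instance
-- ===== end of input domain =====

-- B replaces the offset-product-then-bound-filter with three clamped per-axis range
-- loops that skip only the center (simpler; same values, same order).

-- ===== PORT A =====
-- itertools.product([-1, 0, 1], repeat=3) is ported as three nested flatMaps,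
-- exact for the fixed repeat=3 used at the only call site; list.remove is
-- PySem.List.remove? (the center tuple is always in the product, so the
-- ValueError branch is unreachable and the .getD [] default is dead code).
def get_neighbors_steps : List (Int × Int × Int) :=
  let result :=
    [(-1 : Int), 0, 1].flatMap (fun a =>
      [(-1 : Int), 0, 1].flatMap (fun b =>
        [(-1 : Int), 0, 1].map (fun c => (a, b, c))))
  (PySem.List.remove? result ((0 : Int), (0 : Int), (0 : Int))).getD []

def is_in_grid (val : Int) : Bool := decide (0 ≤ val) && decide (val < 26)

def get_neighbour_coords1 (x : Int) (y : Int) (z : Int) : List (Int × Int × Int) :=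
  get_neighbors_steps.foldl (fun result d =>
    let new_x := x + d.1
    let new_y := y + d.2.1
    let new_z := z + d.2.2
    if ¬(is_in_grid new_x && is_in_grid new_y && is_in_grid new_z) = true then result
    else result ++ [(new_x, new_y, new_z)]) []

-- ===== PORT B =====
def get_neighbour_coords1_alt (x : Int) (y : Int) (z : Int) : List (Int × Int × Int) :=
  (PySem.List.pyRange (max 0 (x - 1)) (min 26 (x + 2)) 1).foldl (fun result nx =>
    (PySem.List.pyRange (max 0 (y - 1)) (min 26 (y + 2)) 1).foldl (fun result ny =>
      (PySem.List.pyRange (max 0 (z - 1)) (min 26 (z + 2)) 1).foldl (fun result nz =>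
        if (nx, ny, nz) ≠ (x, y, z) then result ++ [(nx, ny, nz)] else result)
        result) result) []

-- ===== PRECONDITION & SPEC =====
def Spec_get_neighbour_coords1 (x : Int) (y : Int) (z : Int) (out : List (Int × Int × Int)) : Prop := out = get_neighbour_coords1_alt x y z
instance (x : Int) (y : Int) (z : Int) (out : List (Int × Int × Int)) : Decidable (Spec_get_neighbour_coords1 x y z out) := by unfold Spec_get_neighbour_coords1; infer_instance

-- ===== CLAIM (what is proved, stated in full; the proofs are below) =====
def Claim_equal_get_neighbour_coords1 : Prop := ∀ (x : Int) (y : Int) (z : Int), Dom_get_neighbour_coords1 x y z → Spec_get_neighbour_coords1 x y z (get_neighbour_coords1 x y z)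

-- ===== LEMMAS AND PROOFS =====

-- the evaluated steps list: the 27-tuple product minus the center, in lex order
theorem steps_eval : get_neighbors_steps =
    [(-1, -1, -1), (-1, -1, 0), (-1, -1, 1), (-1, 0, -1), (-1, 0, 0), (-1, 0, 1),
     (-1, 1, -1), (-1, 1, 0), (-1, 1, 1), (0, -1, -1), (0, -1, 0), (0, -1, 1),
     (0, 0, -1), (0, 0, 1), (0, 1, -1), (0, 1, 0), (0, 1, 1), (1, -1, -1),
     (1, -1, 0), (1, -1, 1), (1, 0, -1), (1, 0, 0), (1, 0, 1), (1, 1, -1),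
     (1, 1, 0), (1, 1, 1)] := by decide

-- 'for d in L: if guard(d): out.append(f(d))' written with a negated skip test
theorem foldl_skip {α β : Type} (l : List α) (p : α → Bool) (f : α → β) (acc : List β) :
    l.foldl (fun r a => if ¬ p a = true then r else r ++ [f a]) acc
      = acc ++ (l.filter p).map f := by
  have hfun : (fun (r : List β) a => if ¬ p a = true then r else r ++ [f a])
      = (fun r a => if p a then r ++ [f a] else r) := by
    funext r a; cases h : p a <;> simp
  rw [hfun, PySem.List.foldl_append_if]

-- a filtered flatMap is a flatMap with the test pushed inside
theorem filter_flatMap_eq {α β : Type} (l : List α) (p : α → Bool) (g : α → List β) :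
    (l.filter p).flatMap g = l.flatMap (fun a => if p a = true then g a else []) := by
  induction l with
  | nil => simp
  | cons a l ih => cases h : p a <;> simp [h, ih]

theorem map_eq_flatMap {α β : Type} (l : List α) (f : α → β) :
    l.map f = l.flatMap (fun a => [f a]) := by
  induction l with
  | nil => simp
  | cons a l ih => simp [ih]

-- clamped range = the three ±1 candidates filtered to the grid
theorem axis (v : Int) :
    PySem.List.pyRange (max 0 (v - 1)) (min 26 (v + 2)) 1
      = [v + -1, v + 0, v + 1].filter is_in_grid := by
  refine List.Perm.eq_of_pairwise (le := (· < ·))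
    (fun a b _ _ h1 h2 => absurd h2 (not_lt.2 h1.le)) ?_ ?_
    ((List.perm_ext_iff_of_nodup ?_ ?_).2 ?_)
  · exact PySem.List.pairwise_lt_pyRange_one _ _
  · refine List.Pairwise.filter _ ?_
    simp only [List.pairwise_cons, List.mem_cons, List.not_mem_nil, or_false]
    refine ⟨fun b hb => ?_, fun b hb => ?_, fun b hb => hb.elim, List.Pairwise.nil⟩
    · rcases hb with rfl | rfl <;> omega
    · rcases hb with rfl; omega
  · exact PySem.List.nodup_pyRange_one _ _
  · refine List.Nodup.filter _ ?_
    simp only [List.nodup_cons, List.mem_cons, List.not_mem_nil, List.nodup_nil]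
    refine ⟨?_, ?_, fun h => h.elim, trivial⟩
    · simp only [or_false, not_or]; omega
    · simp only [or_false]; omega
  · intro a
    simp only [PySem.List.mem_pyRange_one, List.mem_filter, List.mem_cons,
      List.not_mem_nil, or_false, is_in_grid, Bool.and_eq_true, decide_eq_true_eq]
    omega

theorem ite_append_nil {α : Type} (c : Prop) [Decidable c] (u v : List α) :
    (if c then u ++ v else []) = (if c then u else []) ++ (if c then v else []) := by
  split <;> simp

theorem ite_ite_nil {α : Type} (c d : Prop) [Decidable c] [Decidable d] (w : List α) :
    (if c then (if d then w else []) else []) = if c ∧ d then w else [] := by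
  by_cases hc : c <;> by_cases hd : d <;> simp [hc, hd]

theorem main_eq (x y z : Int) :
    get_neighbour_coords1 x y z = get_neighbour_coords1_alt x y z := by
  have hx1 : ¬(x + -1 = x) := by omega
  have hx2 : ¬(x + 1 = x) := by omega
  have hy1 : ¬(y + -1 = y) := by omega
  have hy2 : ¬(y + 1 = y) := by omega
  have hz1 : ¬(z + -1 = z) := by omega
  have hz2 : ¬(z + 1 = z) := by omega
  unfold get_neighbour_coords1 get_neighbour_coords1_alt
  rw [steps_eval, foldl_skip]
  simp only [PySem.List.foldl_append_ite, PySem.List.foldl_append_eq_flatMap, axis,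
    map_eq_flatMap, filter_flatMap_eq, List.filter_filter]
  simp [List.flatMap_cons, ite_append_nil, ite_ite_nil, and_assoc, Prod.mk.injEq,
    hx1, hx2, hy1, hy2, hz1, hz2, is_in_grid]

-- ===== VERDICT (by name: the statement is the Claim_ definition above) =====
theorem get_neighbour_coords1_spec : Claim_equal_get_neighbour_coords1 := by
  intro x y z _
  unfold Spec_get_neighbour_coords1
  exact main_eq x y z
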